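-- pv_equiv track=rewrite | github.com/final5team-odiga/EssayAgents | agents/jsxcreate/jsx_content_analyzer.py | _get_vector_color_palette
-- ===== SOURCE A (Python) =====
-- from typing import Dict, List, Callable, Optional, Any
--
-- def _get_vector_color_palette(similar_layouts: List[Dict]) -> str:
--     """벡터 데이터 기반 색상 팔레트 (기존 메서드 완전 보존)"""
--     pdf_sources = [layout.get('pdf_name', '').lower()
--                   for layout in similar_layouts]
--
--     if any('travel' in source for source in pdf_sources):
--         return "여행 블루 팔레트"
--     elif any('culture' in source for source in pdf_sources):
--         return "문화 브라운 팔레트"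
--     elif any('lifestyle' in source for source in pdf_sources):
--         return "라이프스타일 핑크 팔레트"
--     elif any('nature' in source for source in pdf_sources):
--         return "자연 그린 팔레트"
--     else:
--         return "클래식 그레이 팔레트"
-- ===== SOURCE B (Python) =====
-- from typing import Dict, List
--
-- _KEYWORD_PALETTES = [
--     ("travel", "여행 블루 팔레트"),
--     ("culture", "문화 브라운 팔레트"),
--     ("lifestyle", "라이프스타일 핑크 팔레트"),
--     ("nature", "자연 그린 팔레트"),
-- ]
--
-- def _get_vector_color_palette(similar_layouts: List[Dict]) -> str:
--     found = set()
--     for layout in similar_layouts: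
--         name = layout.get('pdf_name', '').lower()
--         for kw, _ in _KEYWORD_PALETTES:
--             if kw in name:
--                 found.add(kw)
--     for kw, palette in _KEYWORD_PALETTES:
--         if kw in found:
--             return palette
--     return "클래식 그레이 팔레트"
-- ===== Notes on version B (the rewrite author's own statement) =====
-- stated objective: alternative
-- what changed: Replaces four separate any-scans over the lowered pdf names with a single traversal that records matching keywords in a set, followed by a constant-size priority lookup over a keyword/palette table.
import Mathlib
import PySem

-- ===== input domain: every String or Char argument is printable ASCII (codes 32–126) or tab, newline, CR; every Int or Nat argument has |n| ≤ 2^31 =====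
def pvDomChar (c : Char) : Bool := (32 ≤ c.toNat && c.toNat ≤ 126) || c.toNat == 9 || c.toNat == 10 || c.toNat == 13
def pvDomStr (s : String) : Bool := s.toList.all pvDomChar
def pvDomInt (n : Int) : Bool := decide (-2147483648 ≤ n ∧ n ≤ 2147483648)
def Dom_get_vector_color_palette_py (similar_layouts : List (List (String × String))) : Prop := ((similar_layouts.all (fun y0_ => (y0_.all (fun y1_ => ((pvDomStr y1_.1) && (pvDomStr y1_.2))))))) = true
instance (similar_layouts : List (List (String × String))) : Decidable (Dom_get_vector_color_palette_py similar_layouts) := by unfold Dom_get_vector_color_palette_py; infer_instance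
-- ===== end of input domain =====

-- ===== PORT A =====
-- layout.get('pdf_name', '').lower()
def pvGetName (layout : List (String × String)) : String :=
  PySem.Str.lower ((PySem.Dict.mk layout).getD "pdf_name" "")

-- B builds the keyword set in ONE pass over similar_layouts, then resolves by a priority table
-- (A makes four separate any-scans). Equivalence of return values is proved below.
def get_vector_color_palette_py (similar_layouts : List (List (String × String))) : String :=
  let pdf_sources := similar_layouts.map pvGetName
  if pdf_sources.any (fun source => PySem.Str.isIn "travel" source) then "여행 블루 팔레트"
  else if pdf_sources.any (fun source => PySem.Str.isIn "culture" source) then "문화 브라운 팔레트"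
  else if pdf_sources.any (fun source => PySem.Str.isIn "lifestyle" source) then "라이프스타일 핑크 팔레트"
  else if pdf_sources.any (fun source => PySem.Str.isIn "nature" source) then "자연 그린 팔레트"
  else "클래식 그레이 팔레트"

-- ===== PORT B =====
def pvKeywordPalettes : List (String × String) :=
  [("travel", "여행 블루 팔레트"), ("culture", "문화 브라운 팔레트"),
   ("lifestyle", "라이프스타일 핑크 팔레트"), ("nature", "자연 그린 팔레트")]

def get_vector_color_palette_py_alt (similar_layouts : List (List (String × String))) : String :=
  let found : PySem.Set String :=
    similar_layouts.foldl (fun acc layout =>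
      let name := pvGetName layout
      pvKeywordPalettes.foldl (fun a kp =>
        if PySem.Str.isIn kp.1 name then PySem.Set.add a kp.1 else a) acc) PySem.Set.empty
  match pvKeywordPalettes.find? (fun kp => PySem.Set.contains found kp.1) with
  | some kp => kp.2
  | none => "클래식 그레이 팔레트"

-- ===== PRECONDITION & SPEC =====
def Spec_get_vector_color_palette_py (similar_layouts : List (List (String × String))) (out : String) : Prop := out = get_vector_color_palette_py_alt similar_layouts
instance (similar_layouts : List (List (String × String))) (out : String) : Decidable (Spec_get_vector_color_palette_py similar_layouts out) := by unfold Spec_get_vector_color_palette_py; infer_instance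

-- ===== CLAIM (what is proved, stated in full; the proofs are below) =====
def Claim_equal_get_vector_color_palette_py : Prop := ∀ (similar_layouts : List (List (String × String))), Dom_get_vector_color_palette_py similar_layouts → Spec_get_vector_color_palette_py similar_layouts (get_vector_color_palette_py similar_layouts)

-- ===== LEMMAS AND PROOFS =====

-- membership after one layout's inner keyword pass
lemma pv_mem_inner (name : String) (acc : PySem.Set String) (x : String) :
    x ∈ pvKeywordPalettes.foldl (fun a kp =>
        if PySem.Str.isIn kp.1 name then PySem.Set.add a kp.1 else a) acc ↔
    x ∈ acc ∨ (x ∈ (pvKeywordPalettes.map Prod.fst) ∧ PySem.Str.isIn x name) := by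
  simp only [pvKeywordPalettes, List.foldl, List.map]
  split_ifs <;> simp_all [PySem.Set.mem_add] <;> aesop

-- membership in the set built by B's single pass
lemma pv_mem_found (similar_layouts : List (List (String × String))) (acc : PySem.Set String)
    (x : String) :
    x ∈ similar_layouts.foldl (fun acc layout =>
        pvKeywordPalettes.foldl (fun a kp =>
          if PySem.Str.isIn kp.1 (pvGetName layout) then PySem.Set.add a kp.1 else a) acc) acc ↔
    x ∈ acc ∨ (x ∈ (pvKeywordPalettes.map Prod.fst) ∧
      similar_layouts.any (fun layout => PySem.Str.isIn x (pvGetName layout))) := by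
  induction similar_layouts generalizing acc with
  | nil => simp
  | cons l t ih =>
    simp only [List.foldl_cons, List.any_cons, ih, pv_mem_inner]
    by_cases h : PySem.Str.isIn x (pvGetName l) = true <;> aesop

lemma pv_contains_found (similar_layouts : List (List (String × String))) (x : String) :
    PySem.Set.contains (similar_layouts.foldl (fun acc layout =>
        pvKeywordPalettes.foldl (fun a kp =>
          if PySem.Str.isIn kp.1 (pvGetName layout) then PySem.Set.add a kp.1 else a) acc)
        PySem.Set.empty) x =
      ((pvKeywordPalettes.map Prod.fst).contains x &&
        similar_layouts.any (fun layout => PySem.Str.isIn x (pvGetName layout))) := by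
  rw [Bool.eq_iff_iff, PySem.Set.contains_iff, pv_mem_found]
  simp [PySem.Set.empty]

theorem get_vector_color_palette_py_spec_aux (similar_layouts : List (List (String × String))) :
    get_vector_color_palette_py similar_layouts = get_vector_color_palette_py_alt similar_layouts := by
  unfold get_vector_color_palette_py get_vector_color_palette_py_alt
  simp only [List.any_map, Function.comp_def, pv_contains_found]
  simp only [pvKeywordPalettes, List.find?_cons, List.find?_nil]
  cases hb1 : (similar_layouts.any fun x => PySem.Str.isIn "travel" (pvGetName x)) <;>
  cases hb2 : (similar_layouts.any fun x => PySem.Str.isIn "culture" (pvGetName x)) <;>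
  cases hb3 : (similar_layouts.any fun x => PySem.Str.isIn "lifestyle" (pvGetName x)) <;>
  cases hb4 : (similar_layouts.any fun x => PySem.Str.isIn "nature" (pvGetName x)) <;>
  simp_all

-- ===== VERDICT (by name: the statement is the Claim_ definition above) =====
theorem get_vector_color_palette_py_spec : Claim_equal_get_vector_color_palette_py := by
  intro sl _
  exact get_vector_color_palette_py_spec_aux sl
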